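-- pv_equiv track=rewrite | github.com/deepomicslab/PALACE | share/palace/scripts/corrected_dup.py | contains_sublist
-- ===== SOURCE A (Python) =====
-- def contains_sublist(A, B):
--     if not B or not A:
--         return False
--     len_A, len_B = len(A), len(B)
--     for i in range(len_A - len_B + 1):
--         if A[i:i + len(B)] == B:
--             return True
--     return False
-- ===== SOURCE B (Python) =====
-- def contains_sublist(A, B):
--     n, m = len(A), len(B)
--     if m == 0 or m > n:
--         return False
--     b0 = B[0]
--     pos = [i for i, x in enumerate(A) if x == b0]
--     for j in range(1, m):
--         bj = B[j]
--         pos = [i for i in pos if i + j < n and A[i + j] == bj]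
--         if not pos:
--             return False
--     return bool(pos)
-- ===== Notes on version B (the rewrite author's own statement) =====
-- stated objective: alternative
-- what changed: Instead of sliding a window and comparing a fresh len(B)-slice at every offset, B rejects oversized patterns up front, collects the candidate start positions of B[0] in one pass, and then shrinks that candidate set one pattern index at a time (column-wise filtering) with an early exit when it empties.
import Mathlib
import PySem

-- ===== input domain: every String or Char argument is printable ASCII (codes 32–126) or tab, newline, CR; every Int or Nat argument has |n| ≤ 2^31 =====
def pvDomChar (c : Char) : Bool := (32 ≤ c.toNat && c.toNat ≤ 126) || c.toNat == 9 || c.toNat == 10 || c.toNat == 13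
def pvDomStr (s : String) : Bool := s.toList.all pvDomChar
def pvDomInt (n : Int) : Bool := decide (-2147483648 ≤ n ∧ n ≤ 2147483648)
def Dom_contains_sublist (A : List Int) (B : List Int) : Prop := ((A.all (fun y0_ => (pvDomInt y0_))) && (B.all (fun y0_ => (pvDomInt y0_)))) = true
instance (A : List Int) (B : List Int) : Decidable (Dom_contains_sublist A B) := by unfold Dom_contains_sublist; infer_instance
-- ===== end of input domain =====

-- B replaces A's per-offset slice comparison by an up-front size check, one pass
-- collecting the candidate start positions of B[0], and per-pattern-index filtering
-- of that candidate set with early exit; equivalence is proved for all inputs.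


-- ===== PORT A =====
-- for i in range(len_A - len_B + 1): if A[i:i + len(B)] == B: return True
def contains_sublist (A : List Int) (B : List Int) : Bool :=
  if B.isEmpty || A.isEmpty then false
  else
    let lenA : Int := PySem.List.len A
    let lenB : Int := PySem.List.len B
    (PySem.List.pyRange 0 (lenA - lenB + 1) 1).any (fun i =>
      PySem.List.slice A (some i) (some (i + PySem.List.len B)) == B)

-- ===== PORT B =====
-- the 'for j in range(1, m)' loop of Source B: recursion on the pattern index j;
-- B[j] is read with getD (exact: the loop only runs for j < len(B)), A[i+j] with
-- pyGet? behind the short-circuit guard i + j < n, exactly as in Python.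
def containsAltLoop (A : List Int) (n : Int) (B : List Int) (m : Nat) :
    Nat → List Int → Bool
  | j, pos =>
    if h : j < m then
      let bj := B.getD j 0
      let pos' := pos.filter (fun i =>
        decide (i + (j : Int) < n) && (PySem.List.pyGet? A (i + (j : Int)) == some bj))
      if pos'.isEmpty then false
      else containsAltLoop A n B m (j + 1) pos'
    else !pos.isEmpty
  termination_by j _ => m - j

-- b0 = B[0] is read with headD (exact: the guard ensures B is nonempty)
def contains_sublist_alt (A : List Int) (B : List Int) : Bool :=
  let n : Int := PySem.List.len A
  let m : Int := PySem.List.len B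
  if m == 0 || m > n then false
  else
    let b0 := B.headD 0
    -- pos = [i for i, x in enumerate(A) if x == b0]
    let pos := ((PySem.List.enumerate A 0).filter (fun p => p.2 == b0)).map (·.1)
    containsAltLoop A n B B.length 1 pos

-- ===== PRECONDITION & SPEC =====
def Spec_contains_sublist (A : List Int) (B : List Int) (out : Bool) : Prop := out = contains_sublist_alt A B
instance (A : List Int) (B : List Int) (out : Bool) : Decidable (Spec_contains_sublist A B out) := by unfold Spec_contains_sublist; infer_instance

-- ===== CLAIM (what is proved, stated in full; the proofs are below) =====
def Claim_equal_contains_sublist : Prop := ∀ (A : List Int) (B : List Int), Dom_contains_sublist A B → Spec_contains_sublist A B (contains_sublist A B)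

-- ===== LEMMAS AND PROOFS =====

-- proof-only helpers: 'okB j i' = position i matches B on all pattern indices k ≤ j;
-- 'posOf j' = the (Nat) candidate positions surviving after pattern index j.
def okB (A B : List Int) (j i : Nat) : Bool :=
  decide (∀ k, k ≤ j → i + k < A.length ∧ A.getD (i + k) 0 = B.getD k 0)

def posOf (A B : List Int) (j : Nat) : List Nat :=
  (List.range A.length).filter (okB A B j)

theorem okB_mono {A B : List Int} {j j' i : Nat} (h : j ≤ j') (hk : okB A B j' i = true) :
    okB A B j i = true := by
  simp only [okB, decide_eq_true_eq] at *
  exact fun k hkj => hk k (hkj.trans h)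

theorem posOf_nil_of_le {A B : List Int} {j j' : Nat} (h : j ≤ j')
    (hn : posOf A B j = []) : posOf A B j' = [] := by
  rw [List.eq_nil_iff_forall_not_mem] at *
  intro i hi
  simp only [posOf, List.mem_filter] at hi
  exact hn i (by simp only [posOf, List.mem_filter]; exact ⟨hi.1, okB_mono h hi.2⟩)

-- the initial comprehension over enumerate, with Nat indices
theorem enum_filter_eq (A : List Int) (b0 : Int) :
    ((PySem.List.enumerate A 0).filter (fun p => p.2 == b0)).map (·.1)
      = ((List.range A.length).filter (fun i => A.getD i 0 == b0)).map (fun i : Nat => (i : Int)) := by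
  rw [PySem.List.enumerate_eq_map_pyRange A 0, List.filter_map, List.map_map,
      PySem.List.len_eq, PySem.List.pyRange_zero_nat, List.filter_map, List.map_map]
  simp [Function.comp_def]

-- initial candidate list of Source B = posOf 0 (cast to Int)
theorem init_eq (A : List Int) (b0 : Int) (rest : List Int) :
    ((PySem.List.enumerate A 0).filter (fun p => p.2 == b0)).map (·.1)
      = (posOf A (b0 :: rest) 0).map (fun i : Nat => (i : Int)) := by
  rw [enum_filter_eq]
  simp only [posOf]
  have h : (List.range A.length).filter (fun i => A.getD i 0 == b0)
      = (List.range A.length).filter (okB A (b0 :: rest) 0) := by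
    apply List.filter_congr; intro i hi
    simp only [List.mem_range] at hi
    rw [Bool.eq_iff_iff]
    simp only [okB, beq_iff_eq, decide_eq_true_eq]
    constructor
    · intro h k hk; interval_cases k; simpa using ⟨hi, h⟩
    · intro h; simpa using (h 0 (le_refl 0)).2
  rw [h]

-- one filter step of the loop = posOf (j+1)
theorem step_eq (A B : List Int) (j : Nat) :
    ((posOf A B j).map (fun i : Nat => (i : Int))).filter (fun i =>
        decide (i + ((j + 1 : Nat) : Int) < PySem.List.len A)
          && (PySem.List.pyGet? A (i + ((j + 1 : Nat) : Int)) == some (B.getD (j + 1) 0)))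
      = (posOf A B (j + 1)).map (fun i : Nat => (i : Int)) := by
  rw [List.filter_map]
  simp only [posOf, List.filter_filter]
  have h : (List.range A.length).filter (fun i : Nat =>
        ((fun i => decide (i + ((j + 1 : Nat) : Int) < PySem.List.len A)
          && (PySem.List.pyGet? A (i + ((j + 1 : Nat) : Int)) == some (B.getD (j + 1) 0))) ∘ (fun i : Nat => (i : Int))) i && okB A B j i)
      = (List.range A.length).filter (okB A B (j + 1)) := by
    apply List.filter_congr
    intro i hi
    simp only [List.mem_range] at hi
    have hc : ((i : Int) + ((j + 1 : Nat) : Int)) = ((i + (j + 1) : Nat) : Int) := by push_cast; ring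
    simp only [Function.comp_apply, hc, PySem.List.pyGet?_natCast, PySem.List.len_eq]
    rw [Bool.eq_iff_iff]
    simp only [okB, Bool.and_eq_true, decide_eq_true_eq]
    constructor
    · rintro ⟨⟨hlt, hget⟩, hok⟩
      have hlt' : i + (j + 1) < A.length := by exact_mod_cast hlt
      intro k hk
      rcases Nat.lt_or_ge k (j + 1) with h | h
      · exact hok k (Nat.lt_succ_iff.mp h)
      · have hkj : k = j + 1 := le_antisymm hk h
        subst hkj
        refine ⟨hlt', ?_⟩
        rw [List.getElem?_eq_getElem hlt'] at hget
        rw [List.getD_eq_getElem _ _ hlt']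
        simpa using hget
    · intro hok
      have h1 := hok (j + 1) (le_refl _)
      refine ⟨⟨by exact_mod_cast h1.1, ?_⟩, fun k hk => hok k (hk.trans (Nat.le_succ j))⟩
      rw [List.getElem?_eq_getElem h1.1]
      rw [List.getD_eq_getElem _ _ h1.1] at h1
      simp [h1.2]
  rw [h]

theorem loop_eq (A B : List Int) (m : Nat) (hm : m = B.length) :
    ∀ j, j + 1 ≤ m →
      containsAltLoop A (PySem.List.len A) B m (j + 1) ((posOf A B j).map (fun i : Nat => (i : Int)))
        = !(posOf A B (m - 1)).isEmpty := by
  intro j hj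
  induction hmj : m - (j + 1) generalizing j with
  | zero =>
    have hje : j + 1 = m := by omega
    rw [containsAltLoop]
    rw [dif_neg (by omega)]
    have : j = m - 1 := by omega
    subst this
    simp
  | succ d ih =>
    have hlt : j + 1 < m := by omega
    rw [containsAltLoop]
    rw [dif_pos hlt]
    simp only
    rw [step_eq A B j]
    by_cases hemp : posOf A B (j + 1) = []
    · have h2 : posOf A B (m - 1) = [] := posOf_nil_of_le (by omega) hemp
      simp [hemp, h2]
    · have h3 : (((posOf A B (j + 1)).map (fun i : Nat => (i : Int))).isEmpty) = false := by
        simp [hemp]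
      rw [h3]
      simp only [Bool.false_eq_true, if_false]
      exact ih (j + 1) (by omega) (by omega)

-- if the pattern is longer than the text no position can survive
theorem posOf_nil_of_long {A B : List Int} (h : A.length < B.length) :
    posOf A B (B.length - 1) = [] := by
  rw [List.eq_nil_iff_forall_not_mem]
  intro i hi
  simp only [posOf, List.mem_filter, List.mem_range, okB, decide_eq_true_eq] at hi
  have := (hi.2 (B.length - 1) (le_refl _)).1
  omega

-- characterisation of B's port
theorem alt_eq_posOf (A : List Int) (b0 : Int) (rest : List Int) :
    contains_sublist_alt A (b0 :: rest) = !(posOf A (b0 :: rest) ((b0 :: rest).length - 1)).isEmpty := by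
  rw [contains_sublist_alt]
  simp only [PySem.List.len_eq]
  split_ifs with hc
  · simp only [Bool.or_eq_true, beq_iff_eq, decide_eq_true_eq] at hc
    have hlen : A.length < (b0 :: rest).length := by
      rcases hc with hc | hc
      · exfalso; rw [List.length_cons] at hc; push_cast at hc; omega
      · exact_mod_cast hc
    rw [posOf_nil_of_long hlen]
    simp
  · simp only [List.headD_cons]
    rw [init_eq A b0 rest]
    exact loop_eq A (b0 :: rest) (b0 :: rest).length rfl 0 (by simp)

-- slice equality ↔ pointwise match of all m pattern positions
theorem slice_eq_iff (A B : List Int) (i : Nat) (hB : B ≠ []) :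
    ((A.drop i).take B.length = B) ↔ (∀ k, k ≤ B.length - 1 → i + k < A.length ∧ A.getD (i + k) 0 = B.getD k 0) := by
  have hm : 0 < B.length := List.length_pos_iff.mpr hB
  constructor
  · intro h k hk
    have hlen : ((A.drop i).take B.length).length = B.length := by rw [h]
    have hlen2 : B.length ≤ A.length - i := by
      simp only [List.length_take, List.length_drop] at hlen
      omega
    have hk' : k < B.length := by omega
    have hik : i + k < A.length := by omega
    refine ⟨hik, ?_⟩
    have : ((A.drop i).take B.length).getD k 0 = B.getD k 0 := by rw [h]
    rw [List.getD_eq_getElem _ _ (by simp [List.length_take, List.length_drop]; omega)] at this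
    rw [List.getElem_take, List.getElem_drop] at this
    rw [List.getD_eq_getElem _ _ hik]
    exact this
  · intro h
    have hik : i + (B.length - 1) < A.length := (h (B.length - 1) (le_refl _)).1
    have hlen2 : i + B.length ≤ A.length := by omega
    apply List.ext_getElem
    · simp [List.length_take, List.length_drop]; omega
    · intro k hk1 hk2
      have hk : k < B.length := hk2
      have := (h k (by omega)).2
      rw [List.getD_eq_getElem _ _ (by omega), List.getD_eq_getElem _ _ hk] at this
      rw [List.getElem_take, List.getElem_drop]
      exact this

-- characterisation of A's port
theorem a_eq_posOf (A : List Int) (b0 : Int) (rest : List Int) :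
    contains_sublist A (b0 :: rest) = !(posOf A (b0 :: rest) ((b0 :: rest).length - 1)).isEmpty := by
  set B := b0 :: rest with hB
  have hBne : B ≠ [] := by simp [hB]
  have hm : 0 < B.length := List.length_pos_iff.mpr hBne
  rw [contains_sublist]
  have hBemp : B.isEmpty = false := by simp [hB]
  rw [hBemp]
  simp only [Bool.false_or]
  by_cases hA : A.isEmpty
  · -- A empty: both sides false
    have hA' : A = [] := List.isEmpty_iff.mp hA
    subst hA'
    have : posOf ([] : List Int) B (B.length - 1) = [] := by simp [posOf]
    simp [hA, this]
  · rw [if_neg (by simp [hA])]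
    simp only [PySem.List.len_eq]
    rw [Bool.eq_iff_iff, List.any_eq_true, Bool.not_eq_true', List.isEmpty_eq_false_iff_exists_mem]
    constructor
    · rintro ⟨x, hx, hsl⟩
      rw [PySem.List.mem_pyRange_one] at hx
      obtain ⟨hx0, hxlt⟩ := hx
      lift x to Nat using hx0 with k
      rw [PySem.List.slice_natCast_add, beq_iff_eq] at hsl
      have hok := (slice_eq_iff A B k hBne).mp hsl
      refine ⟨k, ?_⟩
      simp only [posOf, List.mem_filter, List.mem_range, okB, decide_eq_true_eq]
      have h0 := hok 0 (Nat.zero_le _)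
      exact ⟨by simpa using h0.1, hok⟩
    · rintro ⟨i, hi⟩
      simp only [posOf, List.mem_filter, List.mem_range, okB, decide_eq_true_eq] at hi
      obtain ⟨hin, hok⟩ := hi
      have hsl := (slice_eq_iff A B i hBne).mpr hok
      have him : i + (B.length - 1) < A.length := (hok (B.length - 1) (le_refl _)).1
      refine ⟨(i : Int), ?_, ?_⟩
      · rw [PySem.List.mem_pyRange_one]
        constructor
        · positivity
        · have : i + B.length ≤ A.length := by omega
          omega
      · rw [PySem.List.slice_natCast_add, beq_iff_eq]
        exact hsl

-- ===== VERDICT (by name: the statement is the Claim_ definition above) =====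
theorem contains_sublist_spec : Claim_equal_contains_sublist := by
  intro A B _
  unfold Spec_contains_sublist
  match B with
  | [] => simp [contains_sublist, contains_sublist_alt]
  | b0 :: rest => rw [a_eq_posOf, alt_eq_posOf]
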